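-- pv_equiv track=rewrite | github.com/roosephu/project-euler | 361.py | Asize
-- ===== SOURCE A (Python) =====
-- def cntsumK(k):
--     '''The number of valid integers < 2**k'''
--     if k < 4 : return [0,1,3,6][k]
--     m = 3
--     cm = 3
--     d = 1
--     res = 6
--     while True:
--         if m + d >= k:
--             r = k - m
--             return res + cm * r + 2*r*(r+1)//2
--         res += d *cm + 2*d*(d+1)//2
--         m += d
--         cm += 2*d
--         if m + d >= k:
--             r = k - m
--             return res + cm * r + r*(r+1)//2
--         res += d * cm + d*(d+1)//2
--         m += d
--         cm += d
--         d *= 2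
--
-- def Asize(m):
--     '''Returns the bit length of A(m)'''
--     hi = 1
--     lo = 0
--     while cntsumK(hi) < m:
--         lo = hi
--         hi *= 2
--     while hi - lo > 1:
--         mi = (hi + lo) // 2
--         if cntsumK(mi) < m:
--             lo = mi
--         else:
--             hi = mi
--     assert cntsumK(lo) < m
--     assert cntsumK(hi) >= m
--     return hi
-- ===== SOURCE B (Python) =====
-- def Asize(m):
--     '''Returns the bit length of A(m): directly inverts the count instead of
--     binary-searching the cntsumK oracle.'''
--     for k, c in enumerate([0, 1, 3, 6]):
--         if c >= m:
--             return k
--     mm, cm, d, res = 3, 3, 1, 6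
--     while True:
--         # first half-block: for 1 <= r <= d, count(mm+r) = res + cm*r + r*(r+1)
--         top = res + cm * d + d * (d + 1)
--         if top >= m:
--             r = 1
--             while res + cm * r + r * (r + 1) < m:
--                 r += 1
--             return mm + r
--         res, mm, cm = top, mm + d, cm + 2 * d
--         # second half-block: for 1 <= r <= d, count(mm+r) = res + cm*r + r*(r+1)//2
--         top = res + cm * d + d * (d + 1) // 2
--         if top >= m:
--             r = 1
--             while res + cm * r + r * (r + 1) // 2 < m:
--                 r += 1
--             return mm + r
--         res, mm, cm = top, mm + d, cm + d
--         d *= 2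
-- ===== Notes on version B (the rewrite author's own statement) =====
-- stated objective: alternative
-- what changed: Instead of an exponential search plus binary search over the cntsumK oracle, B inverts the count directly: it checks the small table, then replays cntsumK's doubling accumulation half-block by half-block and, in the first half-block whose top count reaches m, scans for the exact bit length.
import Mathlib
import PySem

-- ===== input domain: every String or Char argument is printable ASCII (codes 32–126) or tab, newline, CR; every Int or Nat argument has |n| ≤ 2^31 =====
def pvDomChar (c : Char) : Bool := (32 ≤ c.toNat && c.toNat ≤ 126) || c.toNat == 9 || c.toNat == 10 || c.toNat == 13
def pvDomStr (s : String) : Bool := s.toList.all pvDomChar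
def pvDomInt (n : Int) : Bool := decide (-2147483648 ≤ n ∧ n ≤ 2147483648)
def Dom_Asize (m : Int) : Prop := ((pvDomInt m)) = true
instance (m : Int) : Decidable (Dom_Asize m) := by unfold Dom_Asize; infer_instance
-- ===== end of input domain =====

-- B replaces A's exponential-plus-binary search over the cntsumK oracle by a direct
-- incremental inversion of the count accumulation (objective: alternative).

-- ===== PORT A =====
-- helper arithmetic lemmas cited by the ports' termination proofs
theorem pvFd2_nonneg (x : Int) (hx : 0 ≤ x) : 0 ≤ PySem.Int.floordiv x 2 := by
  rw [PySem.Int.floordiv_eq_ediv_of_pos (by norm_num)]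
  exact Int.ediv_nonneg hx (by norm_num)

-- tiny named facts cited by the ports (kept as top-level theorems on purpose)
theorem pvPosDouble {d : Int} (hd : 0 < d) : 0 < 2*d := mul_pos two_pos hd
theorem pvSubToNatLt {a b c : Int} (hab : b < a) (hc : b < c) :
    (c - a).toNat < (c - b).toNat :=
  (Int.toNat_lt_toNat (sub_pos.mpr hc)).mpr (sub_lt_sub_left hab c)
theorem pvCntLoopDec (k m d : Int) (hd : 0 < d) (h2 : ¬ m + 2*d ≥ k) :
    (k - (m+2*d)).toNat < (k - m).toNat :=
  pvSubToNatLt (lt_add_of_pos_right m (pvPosDouble hd))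
    (lt_trans (lt_add_of_pos_right m (pvPosDouble hd)) (lt_of_not_ge h2))

-- the `while True` loop of cntsumK; one recursive call = one full doubling round.
-- Python's loop only runs with d ≥ 1 (d starts at 1 and doubles); the hypothesis
-- argument records that and makes the recursion terminate.
def cntLoop (k m cm d res : Int) (hd : 0 < d) : Int :=
  if h1 : m + d ≥ k then
    res + cm * (k - m) + PySem.Int.floordiv (2*(k-m)*((k-m)+1)) 2
  else if h2 : m + 2*d ≥ k then
    (res + d*cm + PySem.Int.floordiv (2*d*(d+1)) 2)
      + (cm + 2*d)*(k-(m+d)) + PySem.Int.floordiv ((k-(m+d))*((k-(m+d))+1)) 2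
  else
    cntLoop k (m+2*d) (cm+3*d) (2*d)
      ((res + d*cm + PySem.Int.floordiv (2*d*(d+1)) 2)
        + d*(cm+2*d) + PySem.Int.floordiv (d*(d+1)) 2) (pvPosDouble hd)
termination_by (k - m).toNat
decreasing_by exact pvCntLoopDec k m d hd h2

def cntsumK (k : Int) : Int :=
  -- Python `[0,1,3,6][k]`: for k < -4 Python raises IndexError; that is unreachable
  -- from Asize (all calls have k ≥ 0), so the `getD 0` default is never the result.
  if k < 4 then (PySem.List.pyGet? [0,1,3,6] k).getD 0
  else cntLoop k 3 3 1 6 Int.one_pos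

-- one unfolding lemma for cntLoop (so the costly equation machinery appears once),
-- and the three branch lemmas derived from it
theorem cntLoop_eq (k m cm d res : Int) (hd : 0 < d) :
    cntLoop k m cm d res hd =
      if _h1 : m + d ≥ k then
        res + cm * (k - m) + PySem.Int.floordiv (2*(k-m)*((k-m)+1)) 2
      else if _h2 : m + 2*d ≥ k then
        (res + d*cm + PySem.Int.floordiv (2*d*(d+1)) 2)
          + (cm + 2*d)*(k-(m+d)) + PySem.Int.floordiv ((k-(m+d))*((k-(m+d))+1)) 2
      else
        cntLoop k (m+2*d) (cm+3*d) (2*d)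
          ((res + d*cm + PySem.Int.floordiv (2*d*(d+1)) 2)
            + d*(cm+2*d) + PySem.Int.floordiv (d*(d+1)) 2) (pvPosDouble hd) := by
  rw [cntLoop]

theorem cntLoop_base (k m cm d res : Int) (hd : 0 < d) (h : m + d ≥ k) :
    cntLoop k m cm d res hd =
      res + cm * (k - m) + PySem.Int.floordiv (2*(k-m)*((k-m)+1)) 2 := by
  rw [cntLoop_eq, dif_pos h]

theorem cntLoop_mid (k m cm d res : Int) (hd : 0 < d) (h1 : ¬ m + d ≥ k) (h2 : m + 2*d ≥ k) :
    cntLoop k m cm d res hd =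
      (res + d*cm + PySem.Int.floordiv (2*d*(d+1)) 2)
        + (cm + 2*d)*(k-(m+d)) + PySem.Int.floordiv ((k-(m+d))*((k-(m+d))+1)) 2 := by
  rw [cntLoop_eq, dif_neg h1, dif_pos h2]

theorem cntLoop_step (k m cm d res : Int) (hd : 0 < d) (h1 : ¬ m + d ≥ k) (h2 : ¬ m + 2*d ≥ k) :
    cntLoop k m cm d res hd =
      cntLoop k (m+2*d) (cm+3*d) (2*d)
        ((res + d*cm + PySem.Int.floordiv (2*d*(d+1)) 2)
          + d*(cm+2*d) + PySem.Int.floordiv (d*(d+1)) 2) (pvPosDouble hd) := by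
  rw [cntLoop_eq, dif_neg h1, dif_neg h2]

theorem pvFd_two_mul (y : Int) : PySem.Int.floordiv (2*y) 2 = y := by
  rw [PySem.Int.floordiv_eq_ediv_of_pos (by norm_num)]; omega



-- growth of the loop value (cited by asizeLoop1's termination proof)
theorem cntLoop_ge (n : Nat) : ∀ (k m cm d res : Int) (hd : 0 < d),
    (k - m).toNat = n → 1 ≤ cm → 0 ≤ res → m ≤ k →
    res + (k - m) ≤ cntLoop k m cm d res hd := by
  induction n using Nat.strong_induction_on with
  | _ n ih =>
    intro k m cm d res hd hn hc hres hmk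
    by_cases h1 : m + d ≥ k
    · rw [cntLoop_base k m cm d res hd h1,
          show 2*(k-m)*((k-m)+1) = 2*((k-m)*((k-m)+1)) from by ring, pvFd_two_mul]
      have e1 : 1*(k-m) ≤ cm*(k-m) := mul_le_mul_of_nonneg_right hc (by omega)
      have e2 : 0 ≤ (k-m)*((k-m)+1) := mul_nonneg (by omega) (by omega)
      omega
    · by_cases h2 : m + 2*d ≥ k
      · rw [cntLoop_mid k m cm d res hd h1 h2]
        have e5 : PySem.Int.floordiv (2*d*(d+1)) 2 = d*(d+1) := by
          rw [show 2*d*(d+1) = 2*(d*(d+1)) from by ring, pvFd_two_mul]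
        have e1 : d*1 ≤ d*cm := mul_le_mul_of_nonneg_left hc (by omega)
        have e2 : 0 ≤ d*(d+1) := mul_nonneg (by omega) (by omega)
        have e3 : 1*(k-(m+d)) ≤ (cm+2*d)*(k-(m+d)) :=
          mul_le_mul_of_nonneg_right (by omega) (by omega)
        have e4 : 0 ≤ PySem.Int.floordiv ((k-(m+d))*((k-(m+d))+1)) 2 :=
          pvFd2_nonneg _ (mul_nonneg (by omega) (by omega))
        omega
      · rw [cntLoop_step k m cm d res hd h1 h2]
        have e5 : PySem.Int.floordiv (2*d*(d+1)) 2 = d*(d+1) := by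
          rw [show 2*d*(d+1) = 2*(d*(d+1)) from by ring, pvFd_two_mul]
        have e1 : d*1 ≤ d*cm := mul_le_mul_of_nonneg_left hc (by omega)
        have e2 : 0 ≤ d*(d+1) := mul_nonneg (by omega) (by omega)
        have e3 : d*1 ≤ d*(cm+2*d) := mul_le_mul_of_nonneg_left (by omega) (by omega)
        have e4 : 0 ≤ PySem.Int.floordiv (d*(d+1)) 2 := pvFd2_nonneg _ e2
        have ihr := ih (k-(m+2*d)).toNat (hn ▸ pvCntLoopDec k m d hd h2) k (m+2*d) (cm+3*d) (2*d)
          ((res + d*cm + PySem.Int.floordiv (2*d*(d+1)) 2)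
            + d*(cm+2*d) + PySem.Int.floordiv (d*(d+1)) 2)
          (pvPosDouble hd) rfl (by omega) (by omega) (by omega)
        omega

theorem cnt_ge_self (k : Int) (hk : 0 ≤ k) : k ≤ cntsumK k := by
  by_cases h4 : k < 4
  · have hc : k = 0 ∨ k = 1 ∨ k = 2 ∨ k = 3 := by omega
    rcases hc with h|h|h|h <;> (subst h; decide)
  · rw [cntsumK, if_neg h4]
    have := cntLoop_ge (k-3).toNat k 3 3 1 6 Int.one_pos rfl (by norm_num) (by norm_num)
      (by omega)
    omega

theorem pvOneLeDouble {hi : Int} (h : 1 ≤ hi) : 1 ≤ hi*2 :=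
  le_trans h (le_mul_of_one_le_right (le_trans zero_le_one h) one_le_two)
theorem pvLoop1Dec (m hi : Int) (h : 1 ≤ hi) (hg : cntsumK hi < m) :
    (m - hi*2).toNat < (m - hi).toNat :=
  pvSubToNatLt (lt_mul_of_one_lt_right (lt_of_lt_of_le zero_lt_one h) one_lt_two)
    (lt_of_le_of_lt (cnt_ge_self hi (le_trans zero_le_one h)) hg)

-- first while loop of Asize: exponential search
def asizeLoop1 (m lo hi : Int) (h : 1 ≤ hi) : Int × Int :=
  if hg : cntsumK hi < m then asizeLoop1 m hi (hi*2) (pvOneLeDouble h) else (lo, hi)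
termination_by (m - hi).toNat
decreasing_by exact pvLoop1Dec m hi h hg

theorem pvLoSubLt (lo hi : Int) (hgt : hi - lo > 1) : lo < hi :=
  lt_of_sub_pos (lt_trans zero_lt_one hgt)
theorem pvMidGt (lo hi : Int) (hgt : hi - lo > 1) : lo < PySem.Int.floordiv (hi+lo) 2 := by
  rw [PySem.Int.floordiv_eq_ediv_of_pos two_pos]
  exact lt_of_lt_of_le (lt_add_one lo)
    ((Int.le_ediv_iff_mul_le two_pos).mpr (by omega))
theorem pvMidLt (lo hi : Int) (hgt : hi - lo > 1) : PySem.Int.floordiv (hi+lo) 2 < hi := by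
  rw [PySem.Int.floordiv_eq_ediv_of_pos two_pos]
  exact (Int.ediv_lt_iff_lt_mul two_pos).mpr (by omega)
theorem pvMidDec1 (lo hi : Int) (hgt : hi - lo > 1) :
    (hi - PySem.Int.floordiv (hi+lo) 2).toNat < (hi - lo).toNat :=
  pvSubToNatLt (pvMidGt lo hi hgt) (pvLoSubLt lo hi hgt)
theorem pvSubToNatLt' {a b c : Int} (hab : a < b) (hc : c < b) :
    (a - c).toNat < (b - c).toNat :=
  (Int.toNat_lt_toNat (sub_pos.mpr hc)).mpr (sub_lt_sub_right hab c)
theorem pvMidDec2 (lo hi : Int) (hgt : hi - lo > 1) :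
    (PySem.Int.floordiv (hi+lo) 2 - lo).toNat < (hi - lo).toNat :=
  pvSubToNatLt' (pvMidLt lo hi hgt) (pvLoSubLt lo hi hgt)

-- second while loop of Asize: binary search
def asizeLoop2 (m lo hi : Int) : Int :=
  if hgt : hi - lo > 1 then
    if cntsumK (PySem.Int.floordiv (hi+lo) 2) < m then
      asizeLoop2 m (PySem.Int.floordiv (hi+lo) 2) hi
    else
      asizeLoop2 m lo (PySem.Int.floordiv (hi+lo) 2)
  else hi
termination_by (hi - lo).toNat
decreasing_by
  · exact pvMidDec1 lo hi hgt
  · exact pvMidDec2 lo hi hgt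

-- the two trailing asserts of A always pass when A returns (they fail exactly for
-- m ≤ 0, the AssertionError inputs excluded by Pre_Asize), so they do not affect
-- the returned value and are not re-modelled here.
def Asize (m : Int) : Int :=
  let p := asizeLoop1 m 0 1 (le_refl 1)
  asizeLoop2 m p.1 p.2

-- ===== PORT B =====
theorem pvScan1Next (m cm res d r : Int) (h : 1 ≤ r ∧ r ≤ d ∧ m ≤ res + cm*d + d*(d+1))
    (hg : res + cm*r + r*(r+1) < m) : 1 ≤ r+1 ∧ r+1 ≤ d ∧ m ≤ res + cm*d + d*(d+1) := by
  refine ⟨by omega, ?_, h.2.2⟩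
  rcases lt_or_eq_of_le h.2.1 with hl | he
  · omega
  · rw [he] at hg; exact absurd h.2.2 (by omega)
theorem pvScan1Lt (m cm res d r : Int) (h : 1 ≤ r ∧ r ≤ d ∧ m ≤ res + cm*d + d*(d+1))
    (hg : res + cm*r + r*(r+1) < m) : r < d := by
  rcases lt_or_eq_of_le h.2.1 with hl | he
  · exact hl
  · rw [he] at hg; exact absurd h.2.2 (by omega)
theorem pvScan1Dec (m cm res d r : Int) (h : 1 ≤ r ∧ r ≤ d ∧ m ≤ res + cm*d + d*(d+1))
    (hg : res + cm*r + r*(r+1) < m) : (d - (r+1)).toNat < (d - r).toNat :=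
  pvSubToNatLt (lt_add_one r) (pvScan1Lt m cm res d r h hg)

-- inner scan: first r with res + cm*r + r*(r+1) >= m (known to exist at r = d)
def scan1 (m cm res d r : Int) (h : 1 ≤ r ∧ r ≤ d ∧ m ≤ res + cm*d + d*(d+1)) : Int :=
  if hg : res + cm*r + r*(r+1) < m then
    scan1 m cm res d (r+1) (pvScan1Next m cm res d r h hg)
  else r
termination_by (d - r).toNat
decreasing_by exact pvScan1Dec m cm res d r h hg

theorem pvScan2Next (m cm res d r : Int)
    (h : 1 ≤ r ∧ r ≤ d ∧ m ≤ res + cm*d + PySem.Int.floordiv (d*(d+1)) 2)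
    (hg : res + cm*r + PySem.Int.floordiv (r*(r+1)) 2 < m) :
    1 ≤ r+1 ∧ r+1 ≤ d ∧ m ≤ res + cm*d + PySem.Int.floordiv (d*(d+1)) 2 := by
  refine ⟨by omega, ?_, h.2.2⟩
  rcases lt_or_eq_of_le h.2.1 with hl | he
  · omega
  · rw [he] at hg; exact absurd h.2.2 (by omega)
theorem pvScan2Lt (m cm res d r : Int)
    (h : 1 ≤ r ∧ r ≤ d ∧ m ≤ res + cm*d + PySem.Int.floordiv (d*(d+1)) 2)
    (hg : res + cm*r + PySem.Int.floordiv (r*(r+1)) 2 < m) : r < d := by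
  rcases lt_or_eq_of_le h.2.1 with hl | he
  · exact hl
  · rw [he] at hg; exact absurd h.2.2 (by omega)
theorem pvScan2Dec (m cm res d r : Int)
    (h : 1 ≤ r ∧ r ≤ d ∧ m ≤ res + cm*d + PySem.Int.floordiv (d*(d+1)) 2)
    (hg : res + cm*r + PySem.Int.floordiv (r*(r+1)) 2 < m) :
    (d - (r+1)).toNat < (d - r).toNat :=
  pvSubToNatLt (lt_add_one r) (pvScan2Lt m cm res d r h hg)

-- inner scan for the second half-block: value res + cm*r + r*(r+1)//2
def scan2 (m cm res d r : Int)
    (h : 1 ≤ r ∧ r ≤ d ∧ m ≤ res + cm*d + PySem.Int.floordiv (d*(d+1)) 2) : Int :=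
  if hg : res + cm*r + PySem.Int.floordiv (r*(r+1)) 2 < m then
    scan2 m cm res d (r+1) (pvScan2Next m cm res d r h hg)
  else r
termination_by (d - r).toNat
decreasing_by exact pvScan2Dec m cm res d r h hg

-- the `while True` of B: replay the doubling accumulation, stopping in the first
-- half-block whose top count reaches m. The hypothesis arguments record what the
-- Python control flow guarantees (d ≥ 1, cm ≥ 1, running count still below m).
theorem pvScanInit (m d v : Int) (hd : 0 < d) (h1 : v ≥ m) :
    1 ≤ (1:Int) ∧ 1 ≤ d ∧ m ≤ v := ⟨le_refl 1, hd, h1⟩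
theorem pvRoundCm (cm d : Int) (hd : 0 < d) (hc : 1 ≤ cm) : 1 ≤ cm+3*d := by omega
theorem pvRoundDec (m cm d res : Int) (hd : 0 < d) (hc : 1 ≤ cm) (hres : res < m)
    (h2 : ¬ (res + cm*d + d*(d+1)) + (cm+2*d)*d + PySem.Int.floordiv (d*(d+1)) 2 ≥ m) :
    (m - ((res + cm*d + d*(d+1)) + (cm+2*d)*d + PySem.Int.floordiv (d*(d+1)) 2)).toNat
      < (m - res).toNat := by
  refine pvSubToNatLt ?_ hres
  have h3 : 0 < cm*d := mul_pos (lt_of_lt_of_le zero_lt_one hc) hd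
  have h4 : 0 < d*(d+1) := mul_pos hd (lt_trans hd (lt_add_one d))
  have h5 : 0 ≤ (cm+2*d)*d := le_of_lt (mul_pos (by omega) hd)
  have h6 : 0 ≤ PySem.Int.floordiv (d*(d+1)) 2 := pvFd2_nonneg _ (le_of_lt h4)
  omega

def roundLoop (m mm cm d res : Int) (hd : 0 < d) (hc : 1 ≤ cm) (hres : res < m) : Int :=
  if h1 : res + cm*d + d*(d+1) ≥ m then
    mm + scan1 m cm res d 1 (pvScanInit m d _ hd h1)
  else if h2 : (res + cm*d + d*(d+1)) + (cm+2*d)*d + PySem.Int.floordiv (d*(d+1)) 2 ≥ m then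
    (mm + d) + scan2 m (cm+2*d) (res + cm*d + d*(d+1)) d 1 (pvScanInit m d _ hd h2)
  else
    roundLoop m (mm+2*d) (cm+3*d) (2*d)
      ((res + cm*d + d*(d+1)) + (cm+2*d)*d + PySem.Int.floordiv (d*(d+1)) 2)
      (pvPosDouble hd) (pvRoundCm cm d hd hc) (not_le.mp h2)
termination_by (m - res).toNat
decreasing_by exact pvRoundDec m cm d res hd hc hres h2

theorem pvOneLeThree : (1:Int) ≤ 3 := by norm_num

def Asize_alt (m : Int) : Int :=
  if 0 ≥ m then 0
  else if 1 ≥ m then 1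
  else if 3 ≥ m then 2
  else if h6 : 6 ≥ m then 3
  else roundLoop m 3 3 1 6 Int.one_pos pvOneLeThree (not_le.mp h6)

-- ===== PRECONDITION & SPEC =====
-- Pre_ excludes exactly m ≤ 0, on which A's trailing `assert cntsumK(lo) < m` fails
-- with AssertionError (A returns no value there).
def Pre_Asize (m : Int) : Prop := 1 ≤ m
instance (m : Int) : Decidable (Pre_Asize m) := by unfold Pre_Asize; infer_instance
def pvWitness_Asize : Int := 7

def Spec_Asize (m : Int) (out : Int) : Prop := out = Asize_alt m
instance (m : Int) (out : Int) : Decidable (Spec_Asize m out) := by unfold Spec_Asize; infer_instance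

-- ===== CLAIM (what is proved, stated in full; the proofs are below) =====
def Claim_equal_Asize : Prop := ∀ (m : Int), Dom_Asize m → Pre_Asize m → Spec_Asize m (Asize m)

-- ===== LEMMAS AND PROOFS =====
theorem pvFd_add_two_mul (x y : Int) : PySem.Int.floordiv (x + y*2) 2 = PySem.Int.floordiv x 2 + y := by
  rw [PySem.Int.floordiv_eq_ediv_of_pos (by norm_num), PySem.Int.floordiv_eq_ediv_of_pos (by norm_num)]
  omega

-- monotonicity: adding 1 to k adds at least 1 to the loop's value
theorem cntLoop_succ (n : Nat) : ∀ (k m cm d res : Int) (hd : 0 < d),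
    (k - m).toNat = n → 1 ≤ cm → m < k →
    cntLoop k m cm d res hd + 1 ≤ cntLoop (k+1) m cm d res hd := by
  induction n using Nat.strong_induction_on with
  | _ n ih =>
    intro k m cm d res hd hn hc hm
    by_cases h1 : m + d ≥ k
    · by_cases h1' : m + d ≥ k + 1
      · rw [cntLoop_base k m cm d res hd h1, cntLoop_base (k+1) m cm d res hd h1']
        rw [show 2*(k-m)*((k-m)+1) = 2*((k-m)*((k-m)+1)) from by ring,
            show 2*(k+1-m)*((k+1-m)+1) = 2*((k+1-m)*((k+1-m)+1)) from by ring,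
            pvFd_two_mul, pvFd_two_mul]
        have e3 : cm*(k+1-m) = cm*(k-m) + cm := by ring
        have e4 : (k+1-m)*((k+1-m)+1) = (k-m)*((k-m)+1) + 2*((k-m)+1) := by ring
        have e5 : 1 ≤ k - m := by omega
        linarith
      · -- k = m + d exactly
        have hk : k = m + d := by omega
        rw [cntLoop_base k m cm d res hd h1, cntLoop_mid (k+1) m cm d res hd h1' (by omega)]
        rw [show k - m = d from by omega,
            show k + 1 - (m + d) = 1 from by omega,
            show 2*d*(d+1) = 2*(d*(d+1)) from by ring,
            pvFd_two_mul,
            show (1:Int)*(1+1) = 2*1 from by ring, pvFd_two_mul]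
        have e3 : d*cm = cm*d := by ring
        linarith
    · have hx : m + d < k := by omega
      have h1'' : ¬ m + d ≥ k + 1 := by omega
      by_cases h2' : m + 2*d ≥ k + 1
      · rw [cntLoop_mid k m cm d res hd h1 (by omega), cntLoop_mid (k+1) m cm d res hd h1'' h2']
        rw [show (k+1-(m+d))*((k+1-(m+d))+1) = (k-(m+d))*((k-(m+d))+1) + ((k-(m+d))+1)*2 from by ring,
            pvFd_add_two_mul]
        have e3 : (cm+2*d)*(k+1-(m+d)) = (cm+2*d)*(k-(m+d)) + (cm+2*d) := by ring
        have e5 : 1 ≤ k - (m+d) := by omega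
        linarith
      · by_cases h2 : m + 2*d ≥ k
        · -- k = m + 2*d exactly
          have hk : k = m + 2*d := by omega
          rw [cntLoop_mid k m cm d res hd h1 h2,
              cntLoop_step (k+1) m cm d res hd h1'' h2',
              cntLoop_base (k+1) (m+2*d) (cm+3*d) (2*d) _ (by omega) (by omega)]
          rw [show k - (m+d) = d from by omega,
              show k + 1 - (m+2*d) = 1 from by omega,
              show 2*d*(d+1) = 2*(d*(d+1)) from by ring,
              pvFd_two_mul,
              show (2:Int)*1*(1+1) = 2*2 from by ring, pvFd_two_mul]
          have e3 : d*cm = cm*d := by ring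
          have e4 : d*(cm+2*d) = (cm+2*d)*d := by ring
          linarith
        · rw [cntLoop_step k m cm d res hd h1 h2,
              cntLoop_step (k+1) m cm d res hd h1'' h2']
          exact ih (k - (m+2*d)).toNat (by omega) k (m+2*d) (cm+3*d) (2*d) _ (by omega) rfl (by omega) (by omega)

theorem cnt4 : cntsumK 4 = 11 := by
  rw [cntsumK, if_neg (by norm_num), cntLoop_base 4 3 3 1 6 Int.one_pos (by norm_num)]
  decide

theorem cnt_succ (k : Int) (hk : 0 ≤ k) : cntsumK k + 1 ≤ cntsumK (k+1) := by
  by_cases h4 : k < 3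
  · interval_cases k <;> decide
  · by_cases h3 : k = 3
    · subst h3
      have c3 : cntsumK 3 = 6 := by decide
      rw [show (3:Int)+1 = 4 from by norm_num, c3, cnt4]; norm_num
    · have hk4 : 4 ≤ k := by omega
      rw [cntsumK, if_neg (by omega), cntsumK, if_neg (by omega)]
      exact cntLoop_succ (k-3).toNat k 3 3 1 6 Int.one_pos rfl (by norm_num) (by omega)

-- k is the answer for m iff it is the unique k ≥ 1 with cntsumK(k-1) < m ≤ cntsumK(k)
def IsAns (m k : Int) : Prop := 1 ≤ k ∧ cntsumK (k-1) < m ∧ m ≤ cntsumK k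

theorem cnt_mono (a b : Int) (ha : 0 ≤ a) (hab : a ≤ b) : cntsumK a ≤ cntsumK b := by
  induction b, hab using Int.le_induction with
  | base => exact le_refl _
  | succ n hn ih => have := cnt_succ n (by omega); omega

theorem isAns_unique (m k1 k2 : Int) (h1 : IsAns m k1) (h2 : IsAns m k2) : k1 = k2 := by
  obtain ⟨ha1, hb1, hc1⟩ := h1
  obtain ⟨ha2, hb2, hc2⟩ := h2
  rcases lt_trichotomy k1 k2 with h | h | h
  · have := cnt_mono k1 (k2-1) (by omega) (by omega); omega
  · exact h
  · have := cnt_mono k2 (k1-1) (by omega) (by omega); omega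

theorem asizeLoop1_spec (n : Nat) : ∀ (m lo hi : Int) (h : 1 ≤ hi), (m - hi).toNat = n →
    0 ≤ lo → lo < hi → cntsumK lo < m →
    cntsumK (asizeLoop1 m lo hi h).1 < m ∧ m ≤ cntsumK (asizeLoop1 m lo hi h).2 ∧
      0 ≤ (asizeLoop1 m lo hi h).1 ∧ (asizeLoop1 m lo hi h).1 < (asizeLoop1 m lo hi h).2 := by
  induction n using Nat.strong_induction_on with
  | _ n ih =>
    intro m lo hi h hn h0 hlh hlo
    rw [asizeLoop1]
    split_ifs with hg
    · have hs := cnt_ge_self hi (by omega)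
      exact ih (m - hi*2).toNat (by omega) m hi (hi*2) (by omega) rfl (by omega) (by omega) hg
    · exact ⟨hlo, not_lt.mp hg, h0, hlh⟩

theorem asizeLoop2_spec (n : Nat) : ∀ (m lo hi : Int), (hi - lo).toNat = n →
    0 ≤ lo → lo < hi → cntsumK lo < m → m ≤ cntsumK hi → IsAns m (asizeLoop2 m lo hi) := by
  induction n using Nat.strong_induction_on with
  | _ n ih =>
    intro m lo hi hn h0 hlh hlo hhi
    rw [asizeLoop2]
    split_ifs with hgt hmid
    · have hfd : PySem.Int.floordiv (hi+lo) 2 = (hi+lo)/2 :=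
        PySem.Int.floordiv_eq_ediv_of_pos (by norm_num)
      rw [hfd] at hmid ⊢
      exact ih (hi - (hi+lo)/2).toNat (by omega) m ((hi+lo)/2) hi (by omega) (by omega)
        (by omega) hmid hhi
    · have hfd : PySem.Int.floordiv (hi+lo) 2 = (hi+lo)/2 :=
        PySem.Int.floordiv_eq_ediv_of_pos (by norm_num)
      rw [hfd] at hmid ⊢
      exact ih ((hi+lo)/2 - lo).toNat (by omega) m lo ((hi+lo)/2) (by omega) h0
        (by omega) hlo (by omega)
    · refine ⟨by omega, ?_, hhi⟩
      rw [show hi - 1 = lo from by omega]; exact hlo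

theorem asize_isAns (m : Int) (hm : 1 ≤ m) : IsAns m (Asize m) := by
  have c0 : cntsumK 0 = 0 := by decide
  unfold Asize
  have h1 := asizeLoop1_spec (m - 1).toNat m 0 1 (by norm_num) rfl (by norm_num)
    (by norm_num) (by omega)
  exact asizeLoop2_spec _ m _ _ rfl h1.2.2.1 h1.2.2.2 h1.1 h1.2.1

-- value of the loop inside the first half-block of a state
theorem val1 (mm cm d res : Int) (hd : 0 < d) (r : Int) (h0 : 0 ≤ r) (hrd : r ≤ d) :
    cntLoop (mm+r) mm cm d res hd = res + cm*r + r*(r+1) := by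
  rw [cntLoop_base (mm+r) mm cm d res hd (by omega),
      show mm + r - mm = r from by omega,
      show 2*r*(r+1) = 2*(r*(r+1)) from by ring, pvFd_two_mul]

-- value of the loop inside the second half-block of a state
theorem val2 (mm cm d res : Int) (hd : 0 < d) (r : Int) (h0 : 0 ≤ r) (hrd : r ≤ d) :
    cntLoop (mm+d+r) mm cm d res hd =
      (res + cm*d + d*(d+1)) + (cm+2*d)*r + PySem.Int.floordiv (r*(r+1)) 2 := by
  rcases eq_or_lt_of_le h0 with h|h
  · rw [← h, add_zero, val1 mm cm d res hd d (by omega) le_rfl,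
        show (0:Int)*(0+1) = 2*0 from by ring, pvFd_two_mul]
    ring
  · rw [cntLoop_mid (mm+d+r) mm cm d res hd (by omega) (by omega),
        show mm+d+r-(mm+d) = r from by omega,
        show 2*d*(d+1) = 2*(d*(d+1)) from by ring, pvFd_two_mul]
    ring

-- the linking invariant survives one doubling round
theorem inv_step (mm cm d res : Int) (hd : 0 < d)
    (hInv : ∀ k, mm ≤ k → cntsumK k = cntLoop k mm cm d res hd) :
    ∀ k, mm + 2*d ≤ k → cntsumK k =
      cntLoop k (mm+2*d) (cm+3*d) (2*d)
        ((res + cm*d + d*(d+1)) + (cm+2*d)*d + PySem.Int.floordiv (d*(d+1)) 2) (by omega) := by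
  intro k hk
  rcases eq_or_lt_of_le hk with h|h
  · have e1 : cntsumK k
        = (res + cm*d + d*(d+1)) + (cm+2*d)*d + PySem.Int.floordiv (d*(d+1)) 2 := by
      rw [hInv k (by omega), show k = mm + d + d from by omega]
      exact val2 mm cm d res hd d hd.le le_rfl
    have e2 := val1 (mm+2*d) (cm+3*d) (2*d)
      ((res + cm*d + d*(d+1)) + (cm+2*d)*d + PySem.Int.floordiv (d*(d+1)) 2) (by omega)
      0 le_rfl (by omega)
    rw [e1, show k = mm+2*d+0 from by omega, e2]
    ring
  · rw [hInv k (by omega), cntLoop_step k mm cm d res hd (by omega) (by omega),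
        show res + d*cm + PySem.Int.floordiv (2*d*(d+1)) 2 + d*(cm+2*d) + PySem.Int.floordiv (d*(d+1)) 2
           = (res + cm*d + d*(d+1)) + (cm+2*d)*d + PySem.Int.floordiv (d*(d+1)) 2 from by
          rw [show 2*d*(d+1) = 2*(d*(d+1)) from by ring, pvFd_two_mul]; ring]

theorem scan1_spec (n : Nat) : ∀ (m cm res d r : Int)
    (h : 1 ≤ r ∧ r ≤ d ∧ m ≤ res + cm*d + d*(d+1)),
    (d - r).toNat = n → res + cm*(r-1) + (r-1)*r < m →
    r ≤ scan1 m cm res d r h ∧ scan1 m cm res d r h ≤ d ∧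
      res + cm*(scan1 m cm res d r h - 1) + (scan1 m cm res d r h - 1)*(scan1 m cm res d r h) < m ∧
      m ≤ res + cm*(scan1 m cm res d r h) + (scan1 m cm res d r h)*((scan1 m cm res d r h)+1) := by
  induction n using Nat.strong_induction_on with
  | _ n ih =>
    intro m cm res d r h hn hpre
    rw [scan1]
    split_ifs with hg
    · have hrd : r < d := by
        rcases lt_or_eq_of_le h.2.1 with hl | he
        · exact hl
        · rw [he] at hg; exact absurd h.2.2 (by omega)
      have hrec := ih (d - (r+1)).toNat (by omega) m cm res d (r+1) ⟨by omega, by omega, h.2.2⟩ rfl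
        (by rw [show r+1-1 = r from by ring]; exact hg)
      exact ⟨le_trans (by omega) hrec.1, hrec.2⟩
    · exact ⟨le_refl r, h.2.1, hpre, not_lt.mp hg⟩

theorem scan2_spec (n : Nat) : ∀ (m cm res d r : Int)
    (h : 1 ≤ r ∧ r ≤ d ∧ m ≤ res + cm*d + PySem.Int.floordiv (d*(d+1)) 2),
    (d - r).toNat = n → res + cm*(r-1) + PySem.Int.floordiv ((r-1)*r) 2 < m →
    r ≤ scan2 m cm res d r h ∧ scan2 m cm res d r h ≤ d ∧
      res + cm*(scan2 m cm res d r h - 1)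
        + PySem.Int.floordiv ((scan2 m cm res d r h - 1)*(scan2 m cm res d r h)) 2 < m ∧
      m ≤ res + cm*(scan2 m cm res d r h)
        + PySem.Int.floordiv ((scan2 m cm res d r h)*((scan2 m cm res d r h)+1)) 2 := by
  induction n using Nat.strong_induction_on with
  | _ n ih =>
    intro m cm res d r h hn hpre
    rw [scan2]
    split_ifs with hg
    · have hrd : r < d := by
        rcases lt_or_eq_of_le h.2.1 with hl | he
        · exact hl
        · rw [he] at hg; exact absurd h.2.2 (by omega)
      have hrec := ih (d - (r+1)).toNat (by omega) m cm res d (r+1) ⟨by omega, by omega, h.2.2⟩ rfl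
        (by rw [show r+1-1 = r from by ring]; exact hg)
      exact ⟨le_trans (by omega) hrec.1, hrec.2⟩
    · exact ⟨le_refl r, h.2.1, hpre, not_lt.mp hg⟩

-- assembling an answer found inside the first half-block
theorem block1_ans (m mm cm d res s : Int) (hd : 0 < d) (hmm : 0 ≤ mm)
    (hInv : ∀ k, mm ≤ k → cntsumK k = cntLoop k mm cm d res hd)
    (hs1 : 1 ≤ s) (hsd : s ≤ d)
    (hlt : res + cm*(s-1) + (s-1)*s < m) (hge : m ≤ res + cm*s + s*(s+1)) :
    IsAns m (mm + s) := by
  refine ⟨by omega, ?_, ?_⟩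
  · rw [show mm+s-1 = mm+(s-1) from by ring, hInv (mm+(s-1)) (by omega),
        val1 mm cm d res hd (s-1) (by omega) (by omega),
        show (s-1)+1 = s from by ring]
    exact hlt
  · rw [hInv (mm+s) (by omega), val1 mm cm d res hd s (by omega) hsd]
    exact hge

-- assembling an answer found inside the second half-block
theorem block2_ans (m mm cm d res s : Int) (hd : 0 < d) (hmm : 0 ≤ mm)
    (hInv : ∀ k, mm ≤ k → cntsumK k = cntLoop k mm cm d res hd)
    (hs1 : 1 ≤ s) (hsd : s ≤ d)
    (hlt : res + cm*d + d*(d+1) + (cm+2*d)*(s-1) + PySem.Int.floordiv ((s-1)*s) 2 < m)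
    (hge : m ≤ res + cm*d + d*(d+1) + (cm+2*d)*s + PySem.Int.floordiv (s*(s+1)) 2) :
    IsAns m (mm + d + s) := by
  refine ⟨by omega, ?_, ?_⟩
  · rw [show mm+d+s-1 = mm+d+(s-1) from by ring, hInv (mm+d+(s-1)) (by omega),
        val2 mm cm d res hd (s-1) (by omega) (by omega),
        show (s-1)+1 = s from by ring]
    exact hlt
  · rw [hInv (mm+d+s) (by omega), val2 mm cm d res hd s (by omega) hsd]
    exact hge

theorem roundLoop_spec (n : Nat) : ∀ (m mm cm d res : Int)
    (hd : 0 < d) (hc : 1 ≤ cm) (hres : res < m),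
    (m - res).toNat = n → 0 ≤ mm →
    (∀ k, mm ≤ k → cntsumK k = cntLoop k mm cm d res hd) →
    IsAns m (roundLoop m mm cm d res hd hc hres) := by
  induction n using Nat.strong_induction_on with
  | _ n ih =>
    intro m mm cm d res hd hc hres hn hmm hInv
    rw [roundLoop]
    split_ifs with h1 h2
    · have hs := scan1_spec (d-1).toNat m cm res d 1 ⟨le_refl 1, by omega, h1⟩ rfl
        (by rw [show (1:Int)-1 = 0 from by norm_num]; simpa using hres)
      exact block1_ans m mm cm d res _ hd hmm hInv hs.1 hs.2.1 hs.2.2.1 hs.2.2.2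
    · have hs := scan2_spec (d-1).toNat m (cm+2*d) (res + cm*d + d*(d+1)) d 1
        ⟨le_refl 1, by omega, h2⟩ rfl
        (by rw [show (1:Int)-1 = 0 from by norm_num, mul_zero, zero_mul,
                show PySem.Int.floordiv 0 2 = 0 from by decide]
            simpa using not_le.mp h1)
      exact block2_ans m mm cm d res _ hd hmm hInv hs.1 hs.2.1 hs.2.2.1 hs.2.2.2
    · have h3 : 0 < cm*d := mul_pos (by omega) hd
      have h4 : 0 < d*(d+1) := mul_pos hd (by omega)
      have h5 : 0 ≤ (cm+2*d)*d := le_of_lt (mul_pos (by omega) hd)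
      have h6 : 0 ≤ PySem.Int.floordiv (d*(d+1)) 2 := pvFd2_nonneg _ (by omega)
      exact ih (m - ((res + cm*d + d*(d+1)) + (cm+2*d)*d + PySem.Int.floordiv (d*(d+1)) 2)).toNat
        (by omega) m (mm+2*d) (cm+3*d) (2*d) _ (by omega) (by omega) (not_le.mp h2) rfl
        (by omega) (inv_step mm cm d res hd hInv)

theorem alt_isAns (m : Int) (hm : 1 ≤ m) : IsAns m (Asize_alt m) := by
  have t0 : cntsumK 0 = 0 := by decide
  have t1 : cntsumK 1 = 1 := by decide
  have t2 : cntsumK 2 = 3 := by decide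
  have t3 : cntsumK 3 = 6 := by decide
  unfold Asize_alt
  split_ifs with ha hb hc' h6
  · omega
  · refine ⟨le_refl 1, ?_, ?_⟩
    · rw [show (1:Int)-1 = 0 from by norm_num, t0]; omega
    · rw [t1]; omega
  · refine ⟨by norm_num, ?_, ?_⟩
    · rw [show (2:Int)-1 = 1 from by norm_num, t1]; omega
    · rw [t2]; omega
  · refine ⟨by norm_num, ?_, ?_⟩
    · rw [show (3:Int)-1 = 2 from by norm_num, t2]; omega
    · rw [t3]; omega
  · have hInv : ∀ k, (3:Int) ≤ k → cntsumK k = cntLoop k 3 3 1 6 Int.one_pos := by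
      intro k hk
      rcases eq_or_lt_of_le hk with h|h
      · have e := val1 3 3 1 6 (by norm_num) 0 le_rfl (by norm_num)
        norm_num at e
        rw [← h, t3, e]
      · rw [cntsumK, if_neg (by omega)]
    exact roundLoop_spec (m-6).toNat m 3 3 1 6 (by norm_num) (by norm_num) (by omega) rfl
      (by norm_num) hInv

-- ===== VERDICT (by name: the statement is the Claim_ definition above) =====
theorem Asize_spec : Claim_equal_Asize := by
  intro m _ hm
  unfold Spec_Asize
  exact isAns_unique m _ _ (asize_isAns m hm) (alt_isAns m hm)
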